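-- pv_equiv track=rewrite | github.com/MistaEO/UnifiedMinecraftHRL | Minecraft-HRL-Agent/data/fix_dataset.py | fix_coal_gap
-- ===== SOURCE A (Python) =====
-- COAL_SOURCES = {
--     "mine_coal", "loot_blacksmith_chest", "search_mineshaft_chests",
--     "loot_supply_chest", "loot_portal_chest",
-- }
--
-- def fix_coal_gap(sample):
--     """
--     If the sample uses craft_torch but has no coal source, insert mine_coal
--     immediately before the first occurrence of craft_torch.
--     Returns (new_path, was_changed).
--     """
--     path = list(sample["reasoning_path"])
--
--     if "craft_torch" not in path:
--         return path, False
--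
--     has_coal = any(s in path for s in COAL_SOURCES)
--     if has_coal:
--         return path, False
--
--     idx = path.index("craft_torch")
--     path.insert(idx, "mine_coal")
--     return path, True
-- ===== SOURCE B (Python) =====
-- COAL_SOURCES = {
--     "mine_coal", "loot_blacksmith_chest", "search_mineshaft_chests",
--     "loot_supply_chest", "loot_portal_chest",
-- }
--
-- def fix_coal_gap(sample):
--     path = list(sample["reasoning_path"])
--     if not COAL_SOURCES.isdisjoint(path):
--         return path, False
--     out = []
--     changed = False
--     for step in path:
--         if step == "craft_torch" and not changed:
--             out.append("mine_coal")
--             changed = True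
--         out.append(step)
--     return out, changed
-- ===== Notes on version B (the rewrite author's own statement) =====
-- stated objective: alternative
-- what changed: Instead of membership test + any + index + in-place insert, B checks coal with a set isdisjoint and then builds the output list element by element in one pass, emitting mine_coal on the fly at the first craft_torch (no index, no insertion into an existing list).
import Mathlib
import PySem

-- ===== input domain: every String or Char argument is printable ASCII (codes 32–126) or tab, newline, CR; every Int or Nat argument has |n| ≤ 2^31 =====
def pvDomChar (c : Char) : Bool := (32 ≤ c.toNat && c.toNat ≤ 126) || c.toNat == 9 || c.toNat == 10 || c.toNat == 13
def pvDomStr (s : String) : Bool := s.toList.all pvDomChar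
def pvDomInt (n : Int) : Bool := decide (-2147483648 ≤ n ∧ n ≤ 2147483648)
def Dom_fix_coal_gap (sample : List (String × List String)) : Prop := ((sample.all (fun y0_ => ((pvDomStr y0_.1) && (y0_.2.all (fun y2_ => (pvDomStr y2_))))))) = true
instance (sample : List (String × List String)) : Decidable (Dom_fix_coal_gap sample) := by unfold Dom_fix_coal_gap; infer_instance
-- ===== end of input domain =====

-- B replaces A's scans-plus-insert (membership, any over the set, index, in-place insert) with a
-- set-disjointness test and one pass that builds the output list directly, emitting "mine_coal"
-- on the fly at the first "craft_torch"; objective: alternative decomposition, same cost.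

-- ===== PORT A =====
-- COAL_SOURCES, a Python set literal
def pvCoalSources : PySem.Set String :=
  PySem.Set.ofList ["mine_coal", "loot_blacksmith_chest", "search_mineshaft_chests",
    "loot_supply_chest", "loot_portal_chest"]

def fix_coal_gap (sample : List (String × List String)) : List String × Bool :=
  match (PySem.Dict.mk sample).get? "reasoning_path" with
  | none => ([], false)  -- KeyError: excluded by Pre_fix_coal_gap
  | some path =>
    if !(path.contains "craft_torch") then (path, false)
    else
      let has_coal := pvCoalSources.any (fun s => path.contains s)
      if has_coal then (path, false)
      else
        match PySem.List.index? path "craft_torch" with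
        | some idx => (PySem.List.insert path (idx : Int) "mine_coal", true)
        | none => (path, false)  -- unreachable: membership was checked

-- ===== PORT B =====
-- the body of B's for-loop: emit the step, preceded by "mine_coal" at the first craft_torch
def pvEmitStep (acc : List String × Bool) (step : String) : List String × Bool :=
  if step == "craft_torch" && !acc.2 then (acc.1 ++ ["mine_coal", step], true)
  else (acc.1 ++ [step], acc.2)

def fix_coal_gap_alt (sample : List (String × List String)) : List String × Bool :=
  match (PySem.Dict.mk sample).get? "reasoning_path" with
  | none => ([], false)  -- KeyError: excluded by Pre_fix_coal_gap
  | some path =>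
    -- not COAL_SOURCES.isdisjoint(path)
    if path.any (fun x => pvCoalSources.contains x) then (path, false)
    else path.foldl pvEmitStep ([], false)

-- ===== PRECONDITION & SPEC =====
-- Pre_ excludes samples without the key "reasoning_path", on which A raises KeyError.
def Pre_fix_coal_gap (sample : List (String × List String)) : Prop :=
  "reasoning_path" ∈ sample.map Prod.fst
instance (sample : List (String × List String)) : Decidable (Pre_fix_coal_gap sample) := by unfold Pre_fix_coal_gap; infer_instance
def pvWitness_fix_coal_gap : (List (String × List String)) := [("reasoning_path", ["craft_torch"])]

def Spec_fix_coal_gap (sample : List (String × List String)) (out : List String × Bool) : Prop := out = fix_coal_gap_alt sample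
instance (sample : List (String × List String)) (out : List String × Bool) : Decidable (Spec_fix_coal_gap sample out) := by unfold Spec_fix_coal_gap; infer_instance

-- ===== CLAIM (what is proved, stated in full; the proofs are below) =====
def Claim_equal_fix_coal_gap : Prop := ∀ (sample : List (String × List String)), Dom_fix_coal_gap sample → Pre_fix_coal_gap sample → Spec_fix_coal_gap sample (fix_coal_gap sample)

-- ===== LEMMAS AND PROOFS =====

-- once mine_coal has been emitted, the loop just copies the remaining steps
lemma emit_true (xs : List String) : ∀ (acc : List String),
    xs.foldl pvEmitStep (acc, true) = (acc ++ xs, true) := by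
  induction xs with
  | nil => intro acc; simp
  | cons x xs ih =>
    intro acc
    have hstep : pvEmitStep (acc, true) x = (acc ++ [x], true) := by
      simp [pvEmitStep]
    simp [hstep, ih]

-- the loop from a not-yet-changed state: copy until the first craft_torch, emit mine_coal there
lemma emit_false (xs : List String) : ∀ (acc : List String),
    xs.foldl pvEmitStep (acc, false)
      = match PySem.List.index? xs "craft_torch" with
        | some k => (acc ++ xs.take k ++ "mine_coal" :: xs.drop k, true)
        | none => (acc ++ xs, false) := by
  induction xs with
  | nil => intro acc; simp [PySem.List.index?_eq_idxOf?]
  | cons x xs ih =>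
    intro acc
    by_cases hx : x = "craft_torch"
    · subst hx
      have hstep : pvEmitStep (acc, false) "craft_torch"
          = (acc ++ ["mine_coal", "craft_torch"], true) := by
        simp [pvEmitStep]
      rw [List.foldl_cons, hstep, emit_true, PySem.List.index?_cons_self]
      simp
    · have hstep : pvEmitStep (acc, false) x = (acc ++ [x], false) := by
        simp [pvEmitStep, hx]
      rw [List.foldl_cons, hstep, ih, PySem.List.index?_cons_of_ne xs hx]
      cases h : PySem.List.index? xs "craft_torch" with
      | none => simp
      | some k => simp

-- A's any-over-the-set equals B's any-over-the-path (both decide "some coal source occurs")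
lemma any_swap (path : List String) :
    pvCoalSources.any (fun s => path.contains s)
      = path.any (fun x => pvCoalSources.contains x) := by
  rw [Bool.eq_iff_iff]
  simp only [List.any_eq_true, PySem.Set.contains_eq_listContains, List.contains_iff_mem]
  exact ⟨fun ⟨a, h1, h2⟩ => ⟨a, h2, h1⟩, fun ⟨a, h1, h2⟩ => ⟨a, h2, h1⟩⟩

-- Python insert at a valid nonnegative index is take/cons/drop
lemma insert_natCast (xs : List String) (k : Nat) (v : String) (hk : k ≤ xs.length) :
    PySem.List.insert xs (k : Int) v = xs.take k ++ v :: xs.drop k := by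
  unfold PySem.List.insert PySem.List.sliceIndices
  have h1 : ¬ ((1 : Int) < 0) := by omega
  simp only [if_neg h1]
  have h2 : ¬ ((k : Int) < 0) := by omega
  simp only [if_neg h2]
  have h3 : min (k : Int) (xs.length : Int) = (k : Int) := by omega
  simp [h3]

theorem fix_coal_gap_spec_aux (sample : List (String × List String))
    (hpre : Pre_fix_coal_gap sample) :
    fix_coal_gap sample = fix_coal_gap_alt sample := by
  obtain ⟨path, hpath⟩ : ∃ p, (PySem.Dict.mk sample).get? "reasoning_path" = some p := by
    cases h : (PySem.Dict.mk sample).get? "reasoning_path" with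
    | some p => exact ⟨p, rfl⟩
    | none =>
      rw [PySem.Dict.get?_eq_none_iff_not_mem_keys] at h
      simp only [PySem.Dict.keys_mk] at h
      exact absurd hpre h
  unfold fix_coal_gap fix_coal_gap_alt
  rw [hpath]
  dsimp only
  rw [any_swap path]
  cases hany : path.any (fun x => pvCoalSources.contains x) with
  | true => simp
  | false =>
    simp only [Bool.false_eq_true, if_false]
    rw [emit_false path []]
    cases hidx : PySem.List.index? path "craft_torch" with
    | none =>
      have hmem : "craft_torch" ∉ path := (PySem.List.index?_eq_none_iff _ _).mp hidx
      simp [hmem]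
    | some k =>
      have hmem : "craft_torch" ∈ path := by
        by_contra h
        have hnone := (PySem.List.index?_eq_none_iff path "craft_torch").mpr h
        rw [hidx] at hnone
        exact Option.some_ne_none k hnone
      obtain ⟨hk, -, -⟩ := PySem.List.getElem_of_index?_eq_some hidx
      simp [insert_natCast path k "mine_coal" (le_of_lt hk), hmem]

-- ===== VERDICT (by name: the statement is the Claim_ definition above) =====
theorem fix_coal_gap_spec : Claim_equal_fix_coal_gap := by
  intro sample _ hpre
  exact fix_coal_gap_spec_aux sample hpre
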